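-- pv_equiv track=rewrite | github.com/JadielTeofilo/General-Algorithms | src/green_book/dp/recursive_multiply.py | build_shift_array
-- ===== SOURCE A (Python) =====
-- from typing import List
--
-- def build_shift_array(number: int) -> List[int]:
-- 	""" Builds an array that indicates the
-- 		shifts to be made to achieve the multiplication """
-- 	shift_array: List[int] = []
-- 	multiplier: int = 0
-- 	# Adds a shift of zero for the odd numbers
-- 	if number & 1:
-- 		shift_array.append(0)
-- 	while number > 1:
-- 		multiplier += 1
-- 		number >>= 1
-- 		if number != 1 and number & 1:
-- 			shift_array.append(1)
-- 	shift_array.append(multiplier)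
-- 	return shift_array
-- ===== SOURCE B (Python) =====
-- from typing import List
--
-- def build_shift_array(number: int) -> List[int]:
-- 	""" Builds an array that indicates the shifts to be made
-- 		to achieve the multiplication (closed form, no shift loop) """
-- 	shift_array: List[int] = []
-- 	if number & 1:
-- 		shift_array.append(0)
-- 	if number > 1:
-- 		ones = bin(number).count('1') - 1 - (number & 1)
-- 		shift_array.extend([1] * ones)
-- 		shift_array.append(number.bit_length() - 1)
-- 	else:
-- 		shift_array.append(0)
-- 	return shift_array
-- ===== Notes on version B (the rewrite author's own statement) =====
-- stated objective: simpler
-- what changed: Replaces A's destructive per-bit shift-and-count while loop with a closed form: append 0 iff odd, then for number > 1 extend with popcount(number)-1-(number&1) literal 1s and append bit_length(number)-1, else append 0.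
import Mathlib
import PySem

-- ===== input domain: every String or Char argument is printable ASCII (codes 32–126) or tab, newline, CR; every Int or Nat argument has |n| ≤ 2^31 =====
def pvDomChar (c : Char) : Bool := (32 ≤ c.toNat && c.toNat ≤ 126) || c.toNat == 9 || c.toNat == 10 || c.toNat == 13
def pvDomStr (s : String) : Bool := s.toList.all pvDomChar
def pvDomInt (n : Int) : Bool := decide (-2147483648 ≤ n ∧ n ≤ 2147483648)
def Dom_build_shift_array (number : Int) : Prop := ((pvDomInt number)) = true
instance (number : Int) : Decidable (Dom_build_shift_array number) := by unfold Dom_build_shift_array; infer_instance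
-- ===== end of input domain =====

-- B replaces A's destructive per-bit shift-and-count loop by a closed form built from
-- popcount (bin(n).count('1')) and bit_length; objective: simpler (no loop).

-- ===== PORT A =====
-- termination helper for the while loop (number >>= 1 strictly shrinks while number > 1)
theorem pvShiftRight_one_eq_floordiv (n : Int) : n >>> (1 : Nat) = PySem.Int.floordiv n 2 := by
  rw [PySem.Int.floordiv_eq_ediv_of_pos (by norm_num : (0:Int) < 2), Int.shiftRight_eq_div_pow]
  norm_num

theorem pvHalf_toNat_lt (n : Int) (h : 1 < n) : (n >>> (1 : Nat)).toNat < n.toNat := by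
  rw [pvShiftRight_one_eq_floordiv, PySem.Int.floordiv_eq_ediv_of_pos (by norm_num : (0:Int) < 2)]
  omega

-- the while loop of A: state = (number, multiplier, shift_array)
def buildShiftLoop (number : Int) (multiplier : Int) (shift_array : List Int) : List Int :=
  if h : number > 1 then
    let number' := number >>> (1 : Nat)
    let shift_array' :=
      if number' ≠ 1 ∧ PySem.Int.band number' 1 ≠ 0 then shift_array ++ [1] else shift_array
    buildShiftLoop number' (multiplier + 1) shift_array'
  else shift_array ++ [multiplier]
termination_by number.toNat
decreasing_by exact pvHalf_toNat_lt number h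

def build_shift_array (number : Int) : List Int :=
  let shift_array : List Int := if PySem.Int.band number 1 ≠ 0 then [0] else []
  buildShiftLoop number 0 shift_array

-- ===== PORT B =====
def build_shift_array_alt (number : Int) : List Int :=
  let shift_array : List Int := if PySem.Int.band number 1 ≠ 0 then [0] else []
  if number > 1 then
    -- ones = bin(number).count('1') - 1 - (number & 1)  (nonnegative for number > 1)
    let ones : Nat := PySem.Int.bitCount number - 1 - (PySem.Int.band number 1).toNat
    (shift_array ++ List.replicate ones 1) ++ [((PySem.Int.bitLength number : Nat) : Int) - 1]
  else shift_array ++ [0]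

-- ===== PRECONDITION & SPEC =====
def Spec_build_shift_array (number : Int) (out : List Int) : Prop := out = build_shift_array_alt number
instance (number : Int) (out : List Int) : Decidable (Spec_build_shift_array number out) := by unfold Spec_build_shift_array; infer_instance

-- ===== CLAIM (what is proved, stated in full; the proofs are below) =====
def Claim_equal_build_shift_array : Prop := ∀ (number : Int), Dom_build_shift_array number → Spec_build_shift_array number (build_shift_array number)

-- ===== LEMMAS AND PROOFS =====

theorem pvBitCount_pos : ∀ (k : Nat) (n : Int), n.toNat ≤ k → 1 ≤ n → 1 ≤ PySem.Int.bitCount n := by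
  intro k
  induction k with
  | zero => intro n hk hn; omega
  | succ k ih =>
    intro n hk hn
    rw [PySem.Int.bitCount_of_pos (by omega : (0:Int) < n)]
    by_cases hodd : PySem.Int.mod n 2 = 0
    · have h2 : (2:Int) ∣ n := (PySem.Int.mod_eq_zero_iff_dvd n 2).mp hodd
      have hfd : PySem.Int.floordiv n 2 = n / 2 :=
        PySem.Int.floordiv_eq_ediv_of_pos (by norm_num : (0:Int) < 2)
      have h1 : 1 ≤ PySem.Int.floordiv n 2 := by rw [hfd]; omega
      have hlt : (PySem.Int.floordiv n 2).toNat ≤ k := by rw [hfd]; omega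
      have := ih (PySem.Int.floordiv n 2) hlt h1
      omega
    · have h9 : (0:Int) ≤ PySem.Int.mod n 2 := PySem.Int.mod_nonneg _ (by norm_num)
      omega

theorem pvLoop_eq : ∀ (k : Nat) (n : Int), n.toNat ≤ k → 1 ≤ n → ∀ (m : Int) (acc : List Int),
    buildShiftLoop n m acc =
      (acc ++ List.replicate (PySem.Int.bitCount n - 1 - (PySem.Int.mod n 2).toNat) 1) ++
        [m + ((PySem.Int.bitLength n : Nat) : Int) - 1] := by
  intro k
  induction k with
  | zero => intro n hk hn; omega
  | succ k ih =>
    intro n hk hn m acc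
    by_cases hgt : 1 < n
    · -- loop body runs once
      rw [buildShiftLoop]
      simp only [gt_iff_lt, dif_pos hgt]
      rw [pvShiftRight_one_eq_floordiv]
      have hfd : PySem.Int.floordiv n 2 = n / 2 :=
        PySem.Int.floordiv_eq_ediv_of_pos (by norm_num : (0:Int) < 2)
      have h1' : 1 ≤ PySem.Int.floordiv n 2 := by rw [hfd]; omega
      have hk' : (PySem.Int.floordiv n 2).toNat ≤ k := by rw [hfd]; omega
      set n' := PySem.Int.floordiv n 2 with hn'
      rw [ih n' hk' h1' (m + 1)]
      have hbc : PySem.Int.bitCount n = (PySem.Int.mod n 2).toNat + PySem.Int.bitCount n' :=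
        PySem.Int.bitCount_of_pos (by omega : (0:Int) < n)
      have hbl : PySem.Int.bitLength n = PySem.Int.bitLength n' + 1 :=
        PySem.Int.bitLength_of_pos (by omega : (0:Int) < n)
      have hbc1 : 1 ≤ PySem.Int.bitCount n' := pvBitCount_pos n'.toNat n' le_rfl h1'
      have hmod' : PySem.Int.mod n' 2 = 0 ∨ PySem.Int.mod n' 2 = 1 := by
        have h8 : (0:Int) ≤ PySem.Int.mod n' 2 := PySem.Int.mod_nonneg _ (by norm_num)
        have h9 : PySem.Int.mod n' 2 < 2 := PySem.Int.mod_lt _ (by norm_num)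
        omega
      have htail : (m + 1) + ((PySem.Int.bitLength n' : Nat) : Int) - 1 =
          m + ((PySem.Int.bitLength n : Nat) : Int) - 1 := by
        rw [hbl]; push_cast; ring
      rw [htail, PySem.Int.band_one]
      rcases hmod' with h0 | h1
      · -- n' even: no extra 1 appended
        have : ¬ (n' ≠ 1 ∧ PySem.Int.mod n' 2 ≠ 0) := by
          intro ⟨_, hne⟩; exact hne h0
        rw [if_neg this]
        have : PySem.Int.bitCount n' - 1 - (PySem.Int.mod n' 2).toNat =
            PySem.Int.bitCount n - 1 - (PySem.Int.mod n 2).toNat := by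
          rw [h0, hbc]; omega
        rw [this]
      · by_cases hne1 : n' = 1
        · -- n' = 1: condition false, both replicate counts are 0
          have : ¬ (n' ≠ 1 ∧ PySem.Int.mod n' 2 ≠ 0) := by
            intro ⟨hne, _⟩; exact hne hne1
          rw [if_neg this]
          have hb1 : PySem.Int.bitCount n' = 1 := by rw [hne1]; decide
          have e1 : PySem.Int.bitCount n' - 1 - (PySem.Int.mod n' 2).toNat = 0 := by
            rw [hb1]; omega
          have e2 : PySem.Int.bitCount n - 1 - (PySem.Int.mod n 2).toNat = 0 := by
            rw [hbc, hb1]; omega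
          rw [e1, e2]
        · -- n' odd, n' ≠ 1: one extra 1 appended; bitCount n' ≥ 2
          rw [if_pos ⟨hne1, by rw [h1]; norm_num⟩]
          have hge2 : 2 ≤ n' := by omega
          have hbc' : PySem.Int.bitCount n' =
              (PySem.Int.mod n' 2).toNat + PySem.Int.bitCount (PySem.Int.floordiv n' 2) :=
            PySem.Int.bitCount_of_pos (by omega : (0:Int) < n')
          have hfd' : PySem.Int.floordiv n' 2 = n' / 2 :=
            PySem.Int.floordiv_eq_ediv_of_pos (by norm_num : (0:Int) < 2)
          have hbcin : 1 ≤ PySem.Int.bitCount (PySem.Int.floordiv n' 2) :=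
            pvBitCount_pos _ _ le_rfl (by rw [hfd']; omega)
          have hbc2 : 2 ≤ PySem.Int.bitCount n' := by rw [hbc', h1]; omega
          have hcnt : PySem.Int.bitCount n - 1 - (PySem.Int.mod n 2).toNat =
              (PySem.Int.bitCount n' - 1 - (PySem.Int.mod n' 2).toNat) + 1 := by
            rw [hbc, h1]; omega
          rw [hcnt, List.replicate_succ]
          simp
    · -- loop does not run: n = 1
      have hn1 : n = 1 := by omega
      subst hn1
      rw [buildShiftLoop]
      simp only [gt_iff_lt, lt_irrefl, dif_neg, not_false_iff]
      have h1 : PySem.Int.bitCount 1 = 1 := by decide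
      have h2 : PySem.Int.mod 1 2 = 1 := by decide
      have h3 : PySem.Int.bitLength 1 = 1 := by decide
      rw [h1, h2, h3]
      norm_num

theorem build_shift_array_spec : Claim_equal_build_shift_array := by
  intro number _
  unfold Spec_build_shift_array build_shift_array build_shift_array_alt
  by_cases hgt : 1 < number
  · simp only [gt_iff_lt, if_pos hgt]
    rw [pvLoop_eq number.toNat number le_rfl (by omega)]
    rw [PySem.Int.band_one]
    norm_num
  · rw [buildShiftLoop]
    simp only [gt_iff_lt, if_neg hgt, dif_neg hgt]
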